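-- pv_equiv track=rewrite | github.com/nishantsharma/xml.ai | hier2hier/models/nodeInfoPropagator.py | computeNeighborSelectors
-- ===== SOURCE A (Python) =====
-- def computeNeighborSelectors(flatReOrderedIndexMap):
--     # Every node has a parent. Here, we find an order, which gets parent for each node.
--     selectorForParentInfos = []
--     selectorForChildrenInfoList = []
--     for flatIndexNewPos, (parentIndexNewPos, childIndicesNewPos) in flatReOrderedIndexMap.items():
--         selectorForParentInfos.append(parentIndexNewPos)
--         for i, childIndexNewPos in enumerate(childIndicesNewPos):
--             if i == len(selectorForChildrenInfoList):
--                 selectorForChildrenInfoList.append([])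
--             selectorForChildrenInfoList[i].append(childIndexNewPos)
--     return selectorForParentInfos, selectorForChildrenInfoList
-- ===== SOURCE B (Python) =====
-- def computeNeighborSelectors(flatReOrderedIndexMap):
--     # Alternative decomposition: collect parents and the table of child lists in one pass,
--     # then build the children-selector lists column-major over 0..maxLen-1.
--     selectorForParentInfos = []
--     childLists = []
--     for parentIndexNewPos, childIndicesNewPos in flatReOrderedIndexMap.values():
--         selectorForParentInfos.append(parentIndexNewPos)
--         childLists.append(childIndicesNewPos)
--     maxLen = max((len(c) for c in childLists), default=0)
--     selectorForChildrenInfoList = [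
--         [c[i] for c in childLists if i < len(c)] for i in range(maxLen)
--     ]
--     return selectorForParentInfos, selectorForChildrenInfoList
-- ===== Notes on version B (the rewrite author's own statement) =====
-- stated objective: alternative
-- what changed: Replaces A's row-major incremental column growth (append a new column whenever a node's child index reaches the current column count) with a two-phase build: one pass collecting parents and the child-list table, then an explicit column-major pass for i in range(maxLen).
import Mathlib
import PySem

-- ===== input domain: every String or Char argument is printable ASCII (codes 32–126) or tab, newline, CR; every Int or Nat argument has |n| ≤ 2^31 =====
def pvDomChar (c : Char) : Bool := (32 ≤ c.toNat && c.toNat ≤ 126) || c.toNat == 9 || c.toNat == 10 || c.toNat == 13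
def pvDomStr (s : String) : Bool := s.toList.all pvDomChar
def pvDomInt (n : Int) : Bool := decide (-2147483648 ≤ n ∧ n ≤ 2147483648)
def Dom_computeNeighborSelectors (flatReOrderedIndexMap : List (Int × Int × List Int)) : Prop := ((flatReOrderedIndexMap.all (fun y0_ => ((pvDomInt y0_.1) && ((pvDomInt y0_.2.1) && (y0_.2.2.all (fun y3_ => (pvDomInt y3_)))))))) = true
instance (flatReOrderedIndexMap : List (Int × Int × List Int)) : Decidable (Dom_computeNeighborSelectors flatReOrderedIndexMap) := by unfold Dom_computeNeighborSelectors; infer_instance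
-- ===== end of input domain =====

-- B replaces A's row-major incremental column growth by a two-phase build (collect the
-- child-list table, then construct the children selectors column-major over range(maxLen));
-- same return value, similar cost (objective: alternative).


-- ===== PORT A =====
-- A's inner `for i, childIndexNewPos in enumerate(childIndicesNewPos)` loop, as the obvious
-- structural recursion over the same state; the enumerate counter i is kept as a Nat (it is
-- 0,1,2,… in Python, never negative, so Nat indexing is exact here).
def pvInnerA : List (List Int) → Nat → List Int → List (List Int)
  | cols, _, [] => cols
  | cols, i, c :: rest =>
      -- if i == len(selectorForChildrenInfoList): selectorForChildrenInfoList.append([])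
      let cols1 := if i = cols.length then cols ++ [[]] else cols
      -- selectorForChildrenInfoList[i].append(childIndexNewPos)
      let cols2 := cols1.set i ((cols1.getD i []) ++ [c])
      pvInnerA cols2 (i + 1) rest

def computeNeighborSelectors (flatReOrderedIndexMap : List (Int × Int × List Int)) : List Int × List (List Int) :=
  -- the Python receives a dict; .items() iterates its insertion-ordered unique-key pairs
  let d := PySem.Dict.ofList flatReOrderedIndexMap
  d.items.foldl
    (fun (st : List Int × List (List Int)) row =>
      (st.1 ++ [row.2.1], pvInnerA st.2 0 row.2.2))
    ([], [])

-- ===== PORT B =====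
def computeNeighborSelectors_alt (flatReOrderedIndexMap : List (Int × Int × List Int)) : List Int × List (List Int) :=
  let d := PySem.Dict.ofList flatReOrderedIndexMap
  let vals := d.values
  let selectorForParentInfos := vals.map (·.1)
  let childLists := vals.map (·.2)
  -- max((len(c) for c in childLists), default=0): lengths are Nats, fold of max from 0
  let maxLen := (childLists.map List.length).foldl max 0
  -- column-major: [[c[i] for c in childLists if i < len(c)] for i in range(maxLen)];
  -- i ranges over 0..maxLen-1 and the guard i < len(c) makes c[i] in range, so Nat
  -- range/indexing (getD) is exact here.
  let selectorForChildrenInfoList :=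
    (List.range maxLen).map
      (fun i => (childLists.filter (fun c => decide (i < c.length))).map (fun c => c.getD i 0))
  (selectorForParentInfos, selectorForChildrenInfoList)

-- ===== PRECONDITION & SPEC =====
def Spec_computeNeighborSelectors (flatReOrderedIndexMap : List (Int × Int × List Int)) (out : List Int × List (List Int)) : Prop := out = computeNeighborSelectors_alt flatReOrderedIndexMap
instance (flatReOrderedIndexMap : List (Int × Int × List Int)) (out : List Int × List (List Int)) : Decidable (Spec_computeNeighborSelectors flatReOrderedIndexMap out) := by unfold Spec_computeNeighborSelectors; infer_instance

-- ===== CLAIM (what is proved, stated in full; the proofs are below) =====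
def Claim_equal_computeNeighborSelectors : Prop := ∀ (flatReOrderedIndexMap : List (Int × Int × List Int)), Dom_computeNeighborSelectors flatReOrderedIndexMap → Spec_computeNeighborSelectors flatReOrderedIndexMap (computeNeighborSelectors flatReOrderedIndexMap)

-- ===== LEMMAS AND PROOFS =====

-- column i of a table of child lists (B's inner comprehension)
def pvColJ (cs : List (List Int)) (i : Nat) : List Int :=
  (cs.filter (fun c => decide (i < c.length))).map (fun c => c.getD i 0)

def pvMaxLen (cs : List (List Int)) : Nat := (cs.map List.length).foldl max 0

def pvColsOf (cs : List (List Int)) : List (List Int) :=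
  (List.range (pvMaxLen cs)).map (pvColJ cs)

lemma le_pvMaxLen {c : List Int} {cs : List (List Int)} (h : c ∈ cs) :
    c.length ≤ pvMaxLen cs :=
  (PySem.List.le_foldl_max (cs.map List.length) 0).2 c.length (List.mem_map_of_mem h)

lemma pvMaxLen_append (cs : List (List Int)) (ch : List Int) :
    pvMaxLen (cs ++ [ch]) = max (pvMaxLen cs) ch.length := by
  simp [pvMaxLen, List.foldl_append]

lemma pvColJ_of_ge {cs : List (List Int)} {i : Nat} (h : pvMaxLen cs ≤ i) :
    pvColJ cs i = [] := by
  have hf : cs.filter (fun c => decide (i < c.length)) = [] :=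
    List.filter_eq_nil_iff.mpr (fun c hc => by
      have := le_pvMaxLen hc; simp; omega)
  simp [pvColJ, hf]

lemma pvColJ_append (cs : List (List Int)) (ch : List Int) (i : Nat) :
    pvColJ (cs ++ [ch]) i = pvColJ cs i ++ (if i < ch.length then [ch.getD i 0] else []) := by
  simp [pvColJ, List.filter_append]
  split <;> simp_all

lemma pvColsOf_getD (cs : List (List Int)) (j : Nat) :
    (pvColsOf cs).getD j [] = pvColJ cs j := by
  by_cases h : j < pvMaxLen cs
  · simp [pvColsOf, List.getD, List.getElem?_map, List.getElem?_range h]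
  · rw [pvColJ_of_ge (by omega)]
    have : (List.range (pvMaxLen cs))[j]? = none := List.getElem?_eq_none (by simpa using by omega)
    simp [pvColsOf, List.getD, List.getElem?_map, this]

lemma getD_append_empty (cols : List (List Int)) (j : Nat) :
    ((cols ++ [[]]).getD j ([] : List Int)) = cols.getD j [] := by
  simp [List.getD, List.getElem?_append]
  split
  · rfl
  · rename_i hj
    have h2 : cols[j]? = none := List.getElem?_eq_none (by omega)
    rcases Nat.lt_or_ge (j - cols.length) 1 with h | h
    · have : j - cols.length = 0 := by omega
      simp [this, h2]
    · have : ([[]] : List (List Int))[j - cols.length]? = none :=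
        List.getElem?_eq_none (by simp; omega)
      simp [this, h2]

lemma getD_set_eq (cols1 : List (List Int)) (i j : Nat) (x : List Int) (hi : i < cols1.length) :
    (cols1.set i x).getD j [] = if j = i then x else cols1.getD j [] := by
  simp [List.getD, List.getElem?_set]
  split
  · rename_i h; subst h; simp
  · rename_i h; rw [if_neg (by omega)]

lemma pvInnerA_spec : ∀ (ch : List Int) (i : Nat) (cols : List (List Int)), i ≤ cols.length →
    pvInnerA cols i ch =
      (List.range (max cols.length (i + ch.length))).map
        (fun j => if i ≤ j ∧ j < i + ch.length then cols.getD j [] ++ [ch.getD (j - i) 0]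
                  else cols.getD j []) := by
  intro ch
  induction ch with
  | nil =>
      intro i cols h
      have hm : max cols.length (i + 0) = cols.length := by omega
      rw [pvInnerA]
      simp only [List.length_nil]
      rw [hm]
      apply Eq.symm
      apply List.ext_getElem (by simp)
      intro j h1 h2
      simp only [List.getElem_map, List.getElem_range]
      rw [if_neg (by omega)]
      simp at h1
      simp [List.getD, List.getElem?_eq_getElem h1]
  | cons c rest ih =>
      intro i cols h
      rw [pvInnerA]
      have h1 : (if i = cols.length then cols ++ [[]] else cols).length
          = max cols.length (i + 1) := by
        by_cases hic : i = cols.length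
        · simp [hic]
        · simp [hic]; omega
      set cols1 := if i = cols.length then cols ++ [[]] else cols with hc1def
      have hc1 : ∀ j, cols1.getD j [] = cols.getD j [] := by
        intro j
        by_cases hic : i = cols.length
        · rw [hc1def, if_pos hic, getD_append_empty]
        · rw [hc1def, if_neg hic]
      have hi1 : i < cols1.length := by omega
      set cols2 := cols1.set i (cols1.getD i [] ++ [c]) with hc2def
      have h2len : cols2.length = max cols.length (i + 1) := by
        rw [hc2def, List.length_set, h1]
      have hgd : ∀ j, cols2.getD j [] =
          if j = i then cols.getD i [] ++ [c] else cols.getD j [] := by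
        intro j
        rw [hc2def, getD_set_eq cols1 i j _ hi1, hc1 i, hc1 j]
      rw [ih (i + 1) cols2 (by omega)]
      apply List.ext_getElem (by simp only [List.length_map, List.length_range, List.length_cons, h2len]; omega)
      intro j hj1 hj2
      simp only [List.getElem_map, List.getElem_range]
      by_cases hji : j = i
      · subst hji
        rw [if_neg (by omega), if_pos (by simp only [List.length_cons]; omega), hgd]
        simp
      · by_cases hwin : i + 1 ≤ j ∧ j < i + 1 + rest.length
        · rw [if_pos hwin, if_pos (by simp; omega), hgd, if_neg hji]
          have hsub : j - i = (j - (i + 1)) + 1 := by omega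
          rw [hsub]
          simp [List.getD]
        · rw [if_neg hwin, if_neg (by simp; omega), hgd, if_neg hji]

lemma pvInnerA_colsOf (cs : List (List Int)) (ch : List Int) :
    pvInnerA (pvColsOf cs) 0 ch = pvColsOf (cs ++ [ch]) := by
  rw [pvInnerA_spec ch 0 (pvColsOf cs) (Nat.zero_le _)]
  have hlen : (pvColsOf cs).length = pvMaxLen cs := by simp [pvColsOf]
  conv_rhs => rw [pvColsOf]
  rw [pvMaxLen_append, hlen]
  simp only [Nat.zero_add, Nat.zero_le, true_and, Nat.sub_zero]
  apply List.map_congr_left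
  intro j hj
  rw [pvColsOf_getD, pvColJ_append]
  split
  · rfl
  · simp

lemma pvFold_spec : ∀ (rows : List (Int × Int × List Int)) (parents : List Int) (cs : List (List Int)),
    rows.foldl (fun (st : List Int × List (List Int)) row =>
        (st.1 ++ [row.2.1], pvInnerA st.2 0 row.2.2)) (parents, pvColsOf cs)
      = (parents ++ rows.map (·.2.1), pvColsOf (cs ++ rows.map (·.2.2))) := by
  intro rows
  induction rows with
  | nil => intro parents cs; simp
  | cons r tl ih =>
      intro parents cs
      simp only [List.foldl_cons, pvInnerA_colsOf]
      rw [ih (parents ++ [r.2.1]) (cs ++ [r.2.2])]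
      simp

-- ===== VERDICT (by name: the statement is the Claim_ definition above) =====
theorem computeNeighborSelectors_spec : Claim_equal_computeNeighborSelectors := by
  intro m _
  unfold Spec_computeNeighborSelectors computeNeighborSelectors computeNeighborSelectors_alt
  have h0 : ([] : List (List Int)) = pvColsOf [] := by simp [pvColsOf, pvMaxLen]
  rw [h0, pvFold_spec]
  simp [pvColsOf, pvMaxLen, PySem.Dict.values, List.map_map]
  rfl
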